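-- pv_equiv track=rewrite | github.com/ioan-gwenter/nether-hub-optimiser | tunnels.py | build_branching_paths
-- ===== SOURCE A (Python) =====
-- def manhattan_distance(p1, p2):
--     return abs(p1[0] - p2[0]) + abs(p1[1] - p2[1])
--
-- def build_branching_paths(hub, portals):
--     paths = []
--     connected_portals = [(hub, 'Hub')]
--
--     while portals:
--         best_dist = float('inf')
--         best_path = None
--         best_portal = None
--
--         for portal in portals:
--             for connected, _ in connected_portals:  # Only use the coordinates part of the connected portals
--                 path = axis_aligned_path(connected, portal[0])
--                 path_distance = sum(manhattan_distance(p1, p2) for p1, p2 in path)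
--
--                 if path_distance < best_dist:
--                     best_dist = path_distance
--                     best_path = path
--                     best_portal = portal
--
--         # Add the best path to the paths list
--         paths.extend(best_path)
--         connected_portals.append(best_portal)
--         portals.remove(best_portal)
--
--     return paths, connected_portals
--
-- def axis_aligned_path(p1, p2):
--     """Generate an axis-aligned path between two points p1 and p2."""
--     return [(p1, (p2[0], p1[1])), ((p2[0], p1[1]), p2)]
-- ===== SOURCE B (Python) =====
-- # Prim's MST, O(n^2): keep per-unconnected-portal the best distance and best
-- # connecting point seen so far, updated once per newly connected portal.
-- # Note: A empties the caller's `portals` list in place; B leaves it untouched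
-- # (the equivalence claimed is about the return value).
-- def build_branching_paths(hub, portals):
--     def man(a, b):
--         return abs(a[0] - b[0]) + abs(a[1] - b[1])
--
--     # pending entries: (portal, best_dist_so_far, best_via_so_far)
--     pending = [(p, man(hub, p[0]), hub) for p in portals]
--     paths = []
--     connected_portals = [(hub, 'Hub')]
--     while pending:
--         best = pending[0]
--         for t in pending[1:]:
--             if t[1] < best[1]:
--                 best = t
--         portal, _, via = best
--         c = portal[0]
--         corner = (c[0], via[1])
--         paths.append((via, corner))
--         paths.append((corner, c))
--         connected_portals.append(portal)
--         pending.remove(best)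
--         pending = [(q, man(c, q[0]), c) if man(c, q[0]) < qd else (q, qd, qv)
--                    for (q, qd, qv) in pending]
--     return paths, connected_portals
-- ===== Notes on version B (the rewrite author's own statement) =====
-- stated objective: faster
-- what changed: Replaces A's per-round rescan of every (portal, connected) pair (Prim in O(n^3)) by classic O(n^2) Prim: each unconnected portal carries its best distance and best connecting point, updated once when a portal joins the tree; the two-segment axis-aligned path is built only for the chosen edge, its length computed as a direct Manhattan distance instead of summing segment lengths.
import Mathlib
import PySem

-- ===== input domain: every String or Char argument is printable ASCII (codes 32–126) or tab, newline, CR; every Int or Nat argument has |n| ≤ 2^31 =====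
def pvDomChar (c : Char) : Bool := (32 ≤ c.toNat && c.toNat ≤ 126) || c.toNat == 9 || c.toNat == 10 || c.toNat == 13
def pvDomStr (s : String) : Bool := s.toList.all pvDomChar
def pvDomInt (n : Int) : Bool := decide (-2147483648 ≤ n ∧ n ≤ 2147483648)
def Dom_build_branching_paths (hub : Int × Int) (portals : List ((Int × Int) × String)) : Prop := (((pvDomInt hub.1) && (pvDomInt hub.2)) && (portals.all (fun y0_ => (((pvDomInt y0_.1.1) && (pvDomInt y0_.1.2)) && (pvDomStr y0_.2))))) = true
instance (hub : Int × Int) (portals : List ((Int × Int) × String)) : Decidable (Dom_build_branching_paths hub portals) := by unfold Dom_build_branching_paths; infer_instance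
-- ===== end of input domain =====

-- B replaces A's per-round rescan of every (portal, connected) pair by O(n^2) Prim with a
-- maintained best-distance/best-via entry per unconnected portal.  Python A empties the
-- caller's `portals` list in place; B does not — the equivalence proved is about the
-- return value.

-- ===== PORT A =====
def manhattan_distance (p1 p2 : Int × Int) : Int := |p1.1 - p2.1| + |p1.2 - p2.2|

def axis_aligned_path (p1 p2 : Int × Int) : List ((Int × Int) × (Int × Int)) :=
  [(p1, (p2.1, p1.2)), ((p2.1, p1.2), p2)]

-- body of A's inner `for connected, _ in connected_portals` loop (None modelled as none)
def pvStepA (portal : (Int × Int) × String)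
    (acc : Option (Int × List ((Int × Int) × (Int × Int)) × ((Int × Int) × String)))
    (c : (Int × Int) × String) :
    Option (Int × List ((Int × Int) × (Int × Int)) × ((Int × Int) × String)) :=
  let path := axis_aligned_path c.1 portal.1
  let d := (path.map (fun q => manhattan_distance q.1 q.2)).sum
  match acc with
  | none => some (d, path, portal)
  | some (bd, bp, bpt) => if d < bd then some (d, path, portal) else some (bd, bp, bpt)

-- A's round: the nested best-candidate scan over portals × connected_portals
def pvSelectA (connected portals : List ((Int × Int) × String)) :
    Option (Int × List ((Int × Int) × (Int × Int)) × ((Int × Int) × String)) :=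
  portals.foldl (fun acc portal => connected.foldl (pvStepA portal) acc) none

-- A's `while portals:` loop; fuel = initial length (one portal is removed per round)
def pvLoopA : Nat → List ((Int × Int) × String) → List ((Int × Int) × (Int × Int)) →
    List ((Int × Int) × String) → (List ((Int × Int) × (Int × Int))) × (List ((Int × Int) × String))
  | 0, _, paths, connected => (paths, connected)
  | fuel+1, portals, paths, connected =>
    if portals.isEmpty then (paths, connected)
    else
      match pvSelectA connected portals with
      | none => (paths, connected)   -- unreachable: connected_portals is never empty
      | some (_, bestPath, bestPortal) =>
          pvLoopA fuel ((PySem.List.remove? portals bestPortal).getD portals)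
            (paths ++ bestPath) (connected ++ [bestPortal])

def build_branching_paths (hub : Int × Int) (portals : List ((Int × Int) × String)) :
    (List ((Int × Int) × (Int × Int))) × (List ((Int × Int) × String)) :=
  pvLoopA portals.length portals [] [(hub, "Hub")]

-- ===== PORT B =====
def pvMan (a b : Int × Int) : Int := |a.1 - b.1| + |a.2 - b.2|

-- pending entry: (portal, best_dist_so_far, best_via_so_far)
-- B's first-minimum scan (`best = pending[0]; for t in pending[1:]: …`)
def pvSelB (t : ((Int × Int) × String) × Int × (Int × Int))
    (rest : List (((Int × Int) × String) × Int × (Int × Int))) :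
    ((Int × Int) × String) × Int × (Int × Int) :=
  rest.foldl (fun b u => if u.2.1 < b.2.1 then u else b) t

-- B's relaxation against the newly connected coordinate c
def pvRelaxB (c : Int × Int) (t : ((Int × Int) × String) × Int × (Int × Int)) :
    ((Int × Int) × String) × Int × (Int × Int) :=
  if pvMan c t.1.1 < t.2.1 then (t.1, pvMan c t.1.1, c) else t

def pvLoopB : Nat → List (((Int × Int) × String) × Int × (Int × Int)) →
    List ((Int × Int) × (Int × Int)) → List ((Int × Int) × String) →
    (List ((Int × Int) × (Int × Int))) × (List ((Int × Int) × String))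
  | 0, _, paths, connected => (paths, connected)
  | fuel+1, pending, paths, connected =>
    match pending with
    | [] => (paths, connected)
    | t :: rest =>
      let best := pvSelB t rest
      let c := best.1.1
      let via := best.2.2
      let corner := (c.1, via.2)
      pvLoopB fuel
        (((PySem.List.remove? (t :: rest) best).getD (t :: rest)).map (pvRelaxB c))
        (paths ++ [(via, corner), (corner, c)])
        (connected ++ [best.1])

def build_branching_paths_alt (hub : Int × Int) (portals : List ((Int × Int) × String)) :
    (List ((Int × Int) × (Int × Int))) × (List ((Int × Int) × String)) :=
  pvLoopB portals.length (portals.map (fun p => (p, pvMan hub p.1, hub))) [] [(hub, "Hub")]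

-- ===== PRECONDITION & SPEC =====
def Spec_build_branching_paths (hub : Int × Int) (portals : List ((Int × Int) × String)) (out : (List ((Int × Int) × (Int × Int))) × (List ((Int × Int) × String))) : Prop := out = build_branching_paths_alt hub portals
instance (hub : Int × Int) (portals : List ((Int × Int) × String)) (out : (List ((Int × Int) × (Int × Int))) × (List ((Int × Int) × String))) : Decidable (Spec_build_branching_paths hub portals out) := by unfold Spec_build_branching_paths; infer_instance

-- ===== CLAIM (what is proved, stated in full; the proofs are below) =====
def Claim_equal_build_branching_paths : Prop := ∀ (hub : Int × Int) (portals : List ((Int × Int) × String)), Dom_build_branching_paths hub portals → Spec_build_branching_paths hub portals (build_branching_paths hub portals)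

-- ===== LEMMAS AND PROOFS =====

-- B's maintained (best_dist, best_via) pair, as a fold over the connected coordinates
def pvBf (t : Int × Int) (dv : Int × (Int × Int)) (cs : List (Int × Int)) : Int × (Int × Int) :=
  cs.foldl (fun dv c => if pvMan c t < dv.1 then (pvMan c t, c) else dv) dv

-- the invariant entry carried for a pending portal p, connected tail coordinates `tail`
def pvF (hub : Int × Int) (tail : List (Int × Int)) (p : (Int × Int) × String) :
    ((Int × Int) × String) × Int × (Int × Int) :=
  (p, pvBf p.1 (pvMan hub p.1, hub) tail)

theorem pv_pathdist (a b : Int × Int) :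
    ((axis_aligned_path a b).map (fun q => manhattan_distance q.1 q.2)).sum = pvMan a b := by
  simp [axis_aligned_path, manhattan_distance, pvMan, sub_self]

theorem pvBf_fst_le (t : Int × Int) (dv : Int × (Int × Int)) (cs : List (Int × Int)) :
    (pvBf t dv cs).1 ≤ dv.1 := by
  induction cs generalizing dv with
  | nil => simp [pvBf]
  | cons c cs ih =>
    simp only [pvBf, List.foldl_cons]
    split
    · exact le_trans (ih _) (le_of_lt (by assumption))
    · exact ih _

theorem pvBf_cases (t : Int × Int) (dv : Int × (Int × Int)) (cs : List (Int × Int)) :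
    pvBf t dv cs = dv ∨ (pvBf t dv cs).1 < dv.1 := by
  induction cs generalizing dv with
  | nil => left; rfl
  | cons c cs ih =>
    simp only [pvBf, List.foldl_cons]
    split
    · right
      exact lt_of_le_of_lt (pvBf_fst_le t _ cs) (by assumption)
    · exact ih _

theorem pvBf_attain (t : Int × Int) (dv : Int × (Int × Int)) (cs : List (Int × Int)) :
    pvBf t dv cs = dv ∨ ∃ c ∈ cs, pvBf t dv cs = (pvMan c t, c) := by
  induction cs generalizing dv with
  | nil => left; rfl
  | cons c cs ih =>
    simp only [pvBf, List.foldl_cons]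
    split
    · rcases ih ((pvMan c t, c)) with h | ⟨c', hc', h⟩
      · right; exact ⟨c, List.mem_cons_self .., h⟩
      · right; exact ⟨c', List.mem_cons_of_mem _ hc', h⟩
    · rcases ih dv with h | ⟨c', hc', h⟩
      · left; exact h
      · right; exact ⟨c', List.mem_cons_of_mem _ hc', h⟩

theorem pvBf_le_mem (t : Int × Int) (dv : Int × (Int × Int)) (cs : List (Int × Int))
    (c : Int × Int) (hc : c ∈ cs) : (pvBf t dv cs).1 ≤ pvMan c t := by
  induction cs generalizing dv with
  | nil => cases hc
  | cons c' cs ih =>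
    simp only [pvBf, List.foldl_cons]
    rcases List.mem_cons.mp hc with h | h
    · subst h
      by_cases h1 : pvMan c t < dv.1
      · simp only [if_pos h1]
        exact pvBf_fst_le t _ cs
      · simp only [if_neg h1]
        exact le_trans (pvBf_fst_le t dv cs) (le_of_not_gt h1)
    · by_cases h1 : pvMan c' t < dv.1
      · simp only [if_pos h1]; exact ih _ h
      · simp only [if_neg h1]; exact ih _ h

theorem pvBf_mono_init (t : Int × Int) (cs : List (Int × Int)) :
    ∀ (d : Int) (v : Int × Int) (d' : Int) (v' : Int × Int), d ≤ d' →
      (pvBf t (d, v) cs).1 < d → pvBf t (d', v') cs = pvBf t (d, v) cs := by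
  induction cs with
  | nil => intro d v d' v' _ h; simp [pvBf] at h
  | cons c cs ih =>
    intro d v d' v' hdd h
    by_cases h1 : pvMan c t < d
    · have h1' : pvMan c t < d' := lt_of_lt_of_le h1 hdd
      simp only [pvBf, List.foldl_cons, if_pos h1, if_pos h1']
    · by_cases h2 : pvMan c t < d'
      · simp only [pvBf, List.foldl_cons, if_neg h1, if_pos h2] at h ⊢
        exact ih d v (pvMan c t) c (le_of_not_gt h1) h
      · simp only [pvBf, List.foldl_cons, if_neg h1, if_neg h2] at h ⊢
        exact ih d v d' v' hdd h

theorem pv_inner_eq (cs : List ((Int × Int) × String)) (p : (Int × Int) × String) :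
    ∀ (bd : Int) bp bpt (v0 : Int × Int),
      cs.foldl (pvStepA p) (some (bd, bp, bpt)) =
        (if (pvBf p.1 (bd, v0) (cs.map (·.1))).1 < bd
         then some ((pvBf p.1 (bd, v0) (cs.map (·.1))).1,
                    axis_aligned_path (pvBf p.1 (bd, v0) (cs.map (·.1))).2 p.1, p)
         else some (bd, bp, bpt)) := by
  induction cs with
  | nil => intro bd bp bpt v0; simp [pvBf]
  | cons c cs ih =>
    intro bd bp bpt v0
    simp only [List.foldl_cons, List.map_cons]
    rw [show pvStepA p (some (bd, bp, bpt)) c =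
        (if pvMan c.1 p.1 < bd then some (pvMan c.1 p.1, axis_aligned_path c.1 p.1, p)
         else some (bd, bp, bpt)) from by
      simp only [pvStepA, pv_pathdist]]
    by_cases h1 : pvMan c.1 p.1 < bd
    · rw [if_pos h1, ih (pvMan c.1 p.1) (axis_aligned_path c.1 p.1) p c.1]
      have hbf : pvBf p.1 (bd, v0) (c.1 :: cs.map (·.1)) =
          pvBf p.1 (pvMan c.1 p.1, c.1) (cs.map (·.1)) := by
        simp [pvBf, List.foldl_cons, if_pos h1]
      rw [hbf]
      rcases pvBf_cases p.1 (pvMan c.1 p.1, c.1) (cs.map (·.1)) with h | h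
      · rw [h]; simp [h1]
      · rw [if_pos h, if_pos (lt_trans h h1)]
    · rw [if_neg h1, ih bd bp bpt v0]
      have hbf : pvBf p.1 (bd, v0) (c.1 :: cs.map (·.1)) =
          pvBf p.1 (bd, v0) (cs.map (·.1)) := by
        simp [pvBf, List.foldl_cons, if_neg h1]
      rw [hbf]

theorem pv_inner_main (c0 : (Int × Int) × String) (cs : List ((Int × Int) × String))
    (p : (Int × Int) × String) (bd : Int) (bp : List ((Int × Int) × (Int × Int)))
    (bpt : (Int × Int) × String) :
    (c0 :: cs).foldl (pvStepA p) (some (bd, bp, bpt)) =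
      (if (pvF c0.1 (cs.map (·.1)) p).2.1 < bd
       then some ((pvF c0.1 (cs.map (·.1)) p).2.1,
                  axis_aligned_path (pvF c0.1 (cs.map (·.1)) p).2.2 p.1, p)
       else some (bd, bp, bpt)) := by
  simp only [List.foldl_cons]
  rw [show pvStepA p (some (bd, bp, bpt)) c0 =
      (if pvMan c0.1 p.1 < bd then some (pvMan c0.1 p.1, axis_aligned_path c0.1 p.1, p)
       else some (bd, bp, bpt)) from by
    simp only [pvStepA, pv_pathdist]]
  by_cases h1 : pvMan c0.1 p.1 < bd
  · rw [if_pos h1, pv_inner_eq cs p (pvMan c0.1 p.1) (axis_aligned_path c0.1 p.1) p c0.1]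
    simp only [pvF]
    rcases pvBf_cases p.1 (pvMan c0.1 p.1, c0.1) (cs.map (·.1)) with h | h
    · rw [h]; simp [h1]
    · rw [if_pos h, if_pos (lt_trans h h1)]
  · rw [if_neg h1, pv_inner_eq cs p bd bp bpt c0.1]
    simp only [pvF]
    by_cases hr : (pvBf p.1 (bd, c0.1) (cs.map (·.1))).1 < bd
    · have hg : pvBf p.1 (pvMan c0.1 p.1, c0.1) (cs.map (·.1)) =
          pvBf p.1 (bd, c0.1) (cs.map (·.1)) :=
        pvBf_mono_init p.1 (cs.map (·.1)) bd c0.1 (pvMan c0.1 p.1) c0.1 (le_of_not_gt h1) hr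
      rw [hg]
    · have hg : ¬ (pvBf p.1 (pvMan c0.1 p.1, c0.1) (cs.map (·.1))).1 < bd := by
        intro hlt
        rcases pvBf_attain p.1 (pvMan c0.1 p.1, c0.1) (cs.map (·.1)) with h | ⟨c', hc', h⟩
        · rw [h] at hlt; exact h1 hlt
        · rw [h] at hlt
          exact hr (lt_of_le_of_lt (pvBf_le_mem p.1 (bd, c0.1) (cs.map (·.1)) c' hc') hlt)
      rw [if_neg hr, if_neg hg]

theorem pv_inner_none (c0 : (Int × Int) × String) (cs : List ((Int × Int) × String))
    (p : (Int × Int) × String) :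
    (c0 :: cs).foldl (pvStepA p) none =
      some ((pvF c0.1 (cs.map (·.1)) p).2.1,
            axis_aligned_path (pvF c0.1 (cs.map (·.1)) p).2.2 p.1, p) := by
  simp only [List.foldl_cons]
  rw [show pvStepA p none c0 =
      some (pvMan c0.1 p.1, axis_aligned_path c0.1 p.1, p) from by
    simp only [pvStepA, pv_pathdist]]
  rw [pv_inner_eq cs p (pvMan c0.1 p.1) (axis_aligned_path c0.1 p.1) p c0.1]
  simp only [pvF]
  rcases pvBf_cases p.1 (pvMan c0.1 p.1, c0.1) (cs.map (·.1)) with h | h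
  · rw [h]; simp
  · rw [if_pos h]

theorem pv_outer (c0 : (Int × Int) × String) (cs : List ((Int × Int) × String))
    (ps : List ((Int × Int) × String)) :
    ∀ (q : (Int × Int) × String),
      ps.foldl (fun acc p => (c0 :: cs).foldl (pvStepA p) acc)
        (some ((pvF c0.1 (cs.map (·.1)) q).2.1,
               axis_aligned_path (pvF c0.1 (cs.map (·.1)) q).2.2 q.1, q)) =
      (let b := pvSelB (pvF c0.1 (cs.map (·.1)) q) (ps.map (pvF c0.1 (cs.map (·.1))));
       some (b.2.1, axis_aligned_path b.2.2 b.1.1, b.1)) := by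
  induction ps with
  | nil => intro q; simp [pvSelB, pvF]
  | cons p ps ih =>
    intro q
    rw [List.foldl_cons, List.map_cons]
    rw [pv_inner_main c0 cs p ((pvF c0.1 (cs.map (·.1)) q).2.1)
        (axis_aligned_path (pvF c0.1 (cs.map (·.1)) q).2.2 q.1) q]
    show _ = (let b := pvSelB (if (pvF c0.1 (cs.map (·.1)) p).2.1 <
        (pvF c0.1 (cs.map (·.1)) q).2.1 then pvF c0.1 (cs.map (·.1)) p
        else pvF c0.1 (cs.map (·.1)) q) (ps.map (pvF c0.1 (cs.map (·.1))));
      some (b.2.1, axis_aligned_path b.2.2 b.1.1, b.1))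
    by_cases hc : (pvF c0.1 (cs.map (·.1)) p).2.1 < (pvF c0.1 (cs.map (·.1)) q).2.1
    · rw [if_pos hc, if_pos hc]
      exact ih p
    · rw [if_neg hc, if_neg hc]
      exact ih q

theorem pvSelB_mem (t : ((Int × Int) × String) × Int × (Int × Int))
    (rest : List (((Int × Int) × String) × Int × (Int × Int))) :
    pvSelB t rest ∈ t :: rest := by
  induction rest generalizing t with
  | nil => simp [pvSelB]
  | cons u rest ih =>
    show pvSelB (if u.2.1 < t.2.1 then u else t) rest ∈ t :: u :: rest
    rcases List.mem_cons.mp (ih (if u.2.1 < t.2.1 then u else t)) with h | h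
    · rw [h]
      split
      · exact List.mem_cons_of_mem _ (List.mem_cons_self ..)
      · exact List.mem_cons_self ..
    · exact List.mem_cons_of_mem _ (List.mem_cons_of_mem _ h)

theorem pv_remove_map (hub : Int × Int) (tail : List (Int × Int))
    (l : List ((Int × Int) × String)) (a : (Int × Int) × String) (ha : a ∈ l) :
    PySem.List.remove? (l.map (pvF hub tail)) (pvF hub tail a) =
      (PySem.List.remove? l a).map (List.map (pvF hub tail)) := by
  induction l with
  | nil => cases ha
  | cons x l ih =>
    by_cases hx : x = a
    · subst hx
      simp [PySem.List.remove?_cons_self]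
    · have hfx : pvF hub tail x ≠ pvF hub tail a := fun h => hx (congrArg Prod.fst h)
      rw [List.map_cons, PySem.List.remove?_cons_of_ne _ hfx, PySem.List.remove?_cons_of_ne _ hx,
        ih (List.mem_of_ne_of_mem (fun h => hx h.symm) ha)]
      cases PySem.List.remove? l a <;> simp

theorem pv_relax_F (hub : Int × Int) (tail : List (Int × Int)) (c : Int × Int)
    (p : (Int × Int) × String) :
    pvRelaxB c (pvF hub tail p) = pvF hub (tail ++ [c]) p := by
  simp only [pvF, pvRelaxB, pvBf, List.foldl_append, List.foldl_cons, List.foldl_nil]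
  split <;> rfl

theorem pvF_fst (hub : Int × Int) (tail : List (Int × Int)) (p : (Int × Int) × String) :
    (pvF hub tail p).1 = p := rfl

theorem pv_loop_eq (fuel : Nat) :
    ∀ (ps : List ((Int × Int) × String)) (paths : List ((Int × Int) × (Int × Int)))
      (c0 : (Int × Int) × String) (csE : List ((Int × Int) × String)),
      pvLoopA fuel ps paths (c0 :: csE) =
        pvLoopB fuel (ps.map (pvF c0.1 (csE.map (·.1)))) paths (c0 :: csE) := by
  induction fuel with
  | zero => intro ps paths c0 csE; rfl
  | succ fuel ih =>
    intro ps paths c0 csE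
    cases ps with
    | nil => rfl
    | cons p0 ps' =>
      have hbmem : pvSelB (pvF c0.1 (csE.map (·.1)) p0) (ps'.map (pvF c0.1 (csE.map (·.1))))
          ∈ (p0 :: ps').map (pvF c0.1 (csE.map (·.1))) := by
        simpa using pvSelB_mem (pvF c0.1 (csE.map (·.1)) p0) (ps'.map (pvF c0.1 (csE.map (·.1))))
      obtain ⟨pstar, hmem, hbp⟩ := List.mem_map.mp hbmem
      have hsel : pvSelectA (c0 :: csE) (p0 :: ps') =
          some ((pvF c0.1 (csE.map (·.1)) pstar).2.1,
                axis_aligned_path (pvF c0.1 (csE.map (·.1)) pstar).2.2 pstar.1, pstar) := by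
        show ps'.foldl (fun acc p => (c0 :: csE).foldl (pvStepA p) acc)
            ((c0 :: csE).foldl (pvStepA p0) none) = _
        rw [pv_inner_none c0 csE p0, pv_outer c0 csE ps' p0, ← hbp]
        rfl
      have hstepA : pvLoopA (fuel+1) (p0 :: ps') paths (c0 :: csE) =
          pvLoopA fuel ((p0 :: ps').erase pstar)
            (paths ++ axis_aligned_path (pvF c0.1 (csE.map (·.1)) pstar).2.2 pstar.1)
            ((c0 :: csE) ++ [pstar]) := by
        simp [pvLoopA, hsel, PySem.List.remove?_eq_some_erase _ _ hmem]
      have e1 : PySem.List.remove? ((p0 :: ps').map (pvF c0.1 (csE.map (·.1))))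
            (pvF c0.1 (csE.map (·.1)) pstar)
          = some (((p0 :: ps').erase pstar).map (pvF c0.1 (csE.map (·.1)))) := by
        rw [pv_remove_map c0.1 (csE.map (·.1)) _ _ hmem,
          PySem.List.remove?_eq_some_erase _ _ hmem]
        rfl
      have hstepB : pvLoopB (fuel+1) ((p0 :: ps').map (pvF c0.1 (csE.map (·.1)))) paths
            (c0 :: csE) =
          pvLoopB fuel
            (((p0 :: ps').erase pstar).map (pvF c0.1 (csE.map (·.1) ++ [pstar.1])))
            (paths ++ axis_aligned_path (pvF c0.1 (csE.map (·.1)) pstar).2.2 pstar.1)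
            ((c0 :: csE) ++ [pstar]) := by
        have e1' := e1
        rw [List.map_cons] at e1'
        simp only [List.map_cons, pvLoopB, ← hbp, pvF_fst]
        rw [e1', Option.getD_some, List.map_map]
        rw [List.map_congr_left
          (fun x _ => (by exact pv_relax_F c0.1 (csE.map (·.1)) pstar.1 x :
            (pvRelaxB pstar.1 ∘ pvF c0.1 (csE.map (·.1))) x = pvF c0.1 (csE.map (·.1) ++ [pstar.1]) x))]
        rfl
      rw [hstepA, hstepB]
      have := ih ((p0 :: ps').erase pstar)
        (paths ++ axis_aligned_path (pvF c0.1 (csE.map (·.1)) pstar).2.2 pstar.1)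
        c0 (csE ++ [pstar])
      simpa [List.map_append] using this

-- ===== VERDICT (by name: the statement is the Claim_ definition above) =====
theorem build_branching_paths_spec : Claim_equal_build_branching_paths := by
  intro hub portals _
  unfold Spec_build_branching_paths build_branching_paths build_branching_paths_alt
  have h := pv_loop_eq portals.length portals [] (hub, "Hub") []
  simp only [List.map_nil] at h
  rw [h]
  rfl
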